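-- pv_equiv track=rewrite | github.com/Laurence-Cullen/Dulcimer-Tab-Converter | main.py | notes_to_dulcimer_tab
-- ===== SOURCE A (Python) =====
-- dulcimer_map = {
--     "E": "[1]",
--     "G": "[2]",
--     "A": "[3]",
--     "B": "[4]",
--     "C": "[5]",
--     "C#": "1",
--     "D": "[6]/2",
--     "D#": "3",
--     "e": "[7]",
--     "f": "[8]",
--     "f#": "4",
--     "g": "5",
--     "g#": "[9]/(1)",
--     "a": "[10]/6/(2)",
--     "a#": "[11]/(3)",
--     "b": "[12]/7",
--     "c": "8",
--     "c#": "(4)",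
--     "d": "9/(5)",
--     "d#": "10",
--     "e'": "(6)",
--     "f'": "11",
--     "f#'": "(7)",
--     "g'": "(8)",
--     "g#'": "12",
--     "a'": "(9)",
--     "a#'": "(10)",
--     "c'": "(11)",
--     "d#'": "(12)",
-- }
--
-- def notes_to_dulcimer_tab(notes, last_beat, bar_lines=None):
--     """
--
--     :type notes: dict
--     """
--     if bar_lines is None:
--         bar_lines = {}
--
--     dulcimer_tab = ''
--
--     unit_width = 0
--     for note in dulcimer_map:
--         if len(dulcimer_map[note]) > unit_width:
--             unit_width = len(dulcimer_map[note])
--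
--     for beat in range(0, last_beat + 1):
--         if beat in notes:
--             if notes[beat] in dulcimer_map:
--                 fill_value = dulcimer_map[notes[beat]]
--             else:
--                 fill_value = notes[beat]
--
--             padded_fill_value = fill_value + '-' * (unit_width - len(fill_value))
--
--             dulcimer_tab = dulcimer_tab + padded_fill_value
--
--         elif beat in bar_lines:
--             dulcimer_tab = dulcimer_tab + '|' * unit_width
--
--         else:
--             dulcimer_tab = dulcimer_tab + '-' * unit_width
--
--     return dulcimer_tab
-- ===== SOURCE B (Python) =====
-- dulcimer_map = {
--     "E": "[1]",
--     "G": "[2]",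
--     "A": "[3]",
--     "B": "[4]",
--     "C": "[5]",
--     "C#": "1",
--     "D": "[6]/2",
--     "D#": "3",
--     "e": "[7]",
--     "f": "[8]",
--     "f#": "4",
--     "g": "5",
--     "g#": "[9]/(1)",
--     "a": "[10]/6/(2)",
--     "a#": "[11]/(3)",
--     "b": "[12]/7",
--     "c": "8",
--     "c#": "(4)",
--     "d": "9/(5)",
--     "d#": "10",
--     "e'": "(6)",
--     "f'": "11",
--     "f#'": "(7)",
--     "g'": "(8)",
--     "g#'": "12",
--     "a'": "(9)",
--     "a#'": "(10)",
--     "c'": "(11)",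
--     "d#'": "(12)",
-- }
--
--
-- def notes_to_dulcimer_tab(notes, last_beat, bar_lines=None):
--     if bar_lines is None:
--         bar_lines = {}
--
--     unit_width = max((len(v) for v in dulcimer_map.values()), default=0)
--
--     events = sorted(k for k in set(notes) | set(bar_lines) if 0 <= k <= last_beat)
--
--     parts = []
--     cursor = 0
--     for pos in events:
--         parts.append('-' * (unit_width * (pos - cursor)))
--         if pos in notes:
--             fill_value = dulcimer_map.get(notes[pos], notes[pos])
--             parts.append(fill_value + '-' * (unit_width - len(fill_value)))
--         else:
--             parts.append('|' * unit_width)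
--         cursor = pos + 1
--     parts.append('-' * (unit_width * (last_beat + 1 - cursor)))
--
--     return ''.join(parts)
-- ===== Notes on version B (the rewrite author's own statement) =====
-- stated objective: alternative
-- what changed: Instead of scanning every beat 0..last_beat and appending one cell per beat, B sorts the distinct note/bar-line positions inside [0, last_beat], walks a cursor over them emitting each dash gap as one bulk '-'*k string, and joins the collected parts; it trades A's dense per-beat scan for event-driven gap arithmetic.
import Mathlib
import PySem

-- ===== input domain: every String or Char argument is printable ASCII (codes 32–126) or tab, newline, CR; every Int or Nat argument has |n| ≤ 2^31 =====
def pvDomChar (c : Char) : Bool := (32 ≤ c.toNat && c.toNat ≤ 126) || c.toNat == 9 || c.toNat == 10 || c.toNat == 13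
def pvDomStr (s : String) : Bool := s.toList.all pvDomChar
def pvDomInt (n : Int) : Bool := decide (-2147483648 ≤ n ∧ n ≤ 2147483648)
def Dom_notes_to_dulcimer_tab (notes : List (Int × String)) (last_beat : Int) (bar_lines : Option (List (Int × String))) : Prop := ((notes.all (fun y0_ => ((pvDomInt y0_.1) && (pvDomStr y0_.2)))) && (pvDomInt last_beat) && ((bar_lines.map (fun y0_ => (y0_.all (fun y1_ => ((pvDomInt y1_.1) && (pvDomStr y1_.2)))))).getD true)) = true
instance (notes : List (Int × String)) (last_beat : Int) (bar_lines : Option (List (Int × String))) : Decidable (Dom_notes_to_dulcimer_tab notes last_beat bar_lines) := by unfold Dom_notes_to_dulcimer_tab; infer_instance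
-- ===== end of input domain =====

-- B replaces A's beat-by-beat scan of range(0, last_beat+1) by a sorted walk over the
-- distinct event positions (keys of notes/bar_lines inside [0, last_beat]), emitting the
-- dash gaps between events in bulk; objective: alternative event-driven decomposition.

-- module-level constant shared by both Pythons
def dulcimerMap : PySem.Dict String String := PySem.Dict.ofList [
  ("E", "[1]"), ("G", "[2]"), ("A", "[3]"), ("B", "[4]"), ("C", "[5]"),
  ("C#", "1"), ("D", "[6]/2"), ("D#", "3"), ("e", "[7]"), ("f", "[8]"),
  ("f#", "4"), ("g", "5"), ("g#", "[9]/(1)"), ("a", "[10]/6/(2)"),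
  ("a#", "[11]/(3)"), ("b", "[12]/7"), ("c", "8"), ("c#", "(4)"),
  ("d", "9/(5)"), ("d#", "10"), ("e'", "(6)"), ("f'", "11"), ("f#'", "(7)"),
  ("g'", "(8)"), ("g#'", "12"), ("a'", "(9)"), ("a#'", "(10)"),
  ("c'", "(11)"), ("d#'", "(12)")]

-- ===== PORT A =====
def notes_to_dulcimer_tab (notes : List (Int × String)) (last_beat : Int) (bar_lines : Option (List (Int × String))) : String :=
  let bl : PySem.Dict Int String := PySem.Dict.ofList (bar_lines.getD [])
  let nd : PySem.Dict Int String := PySem.Dict.ofList notes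
  -- unit_width loop over the keys of dulcimer_map
  let unit_width : Nat := dulcimerMap.keys.foldl (fun w note =>
      if (dulcimerMap.getD note "").toList.length > w then (dulcimerMap.getD note "").toList.length else w) 0
  let tab : List Char := (PySem.List.pyRange 0 (last_beat + 1) 1).foldl (fun acc beat =>
      if nd.contains beat then
        let notev := nd.getD beat ""
        let fill := match dulcimerMap.get? notev with
          | some v => v
          | none => notev
        acc ++ (fill.toList ++ List.replicate (unit_width - fill.toList.length) '-')
      else if bl.contains beat then
        acc ++ List.replicate unit_width '|'
      else
        acc ++ List.replicate unit_width '-') []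
  String.mk tab

-- ===== PORT B =====
def notes_to_dulcimer_tab_alt (notes : List (Int × String)) (last_beat : Int) (bar_lines : Option (List (Int × String))) : String :=
  let bl : PySem.Dict Int String := PySem.Dict.ofList (bar_lines.getD [])
  let nd : PySem.Dict Int String := PySem.Dict.ofList notes
  -- max((len(v) for v in dulcimer_map.values()), default=0)
  let unit_width : Nat := PySem.List.maxD (dulcimerMap.values.map (fun v => v.toList.length)) (fun x => x) 0
  -- sorted(k for k in set(notes) | set(bar_lines) if 0 <= k <= last_beat)
  let events : List Int := PySem.List.sorted
      (((PySem.Set.ofList nd.keys).union bl.keys).filter (fun k => decide (0 ≤ k) && decide (k ≤ last_beat)))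
      (fun x => x) false
  -- cursor walk; parts accumulated as a char list (''.join)
  let res : List Char × Int := events.foldl (fun st pos =>
      let gap := List.replicate ((unit_width : Int) * (pos - st.2)).toNat '-'
      let cellc : List Char :=
        if nd.contains pos then
          let notev := nd.getD pos ""
          let fill := (dulcimerMap.get? notev).getD notev
          fill.toList ++ List.replicate (unit_width - fill.toList.length) '-'
        else
          List.replicate unit_width '|'
      (st.1 ++ gap ++ cellc, pos + 1)) ([], 0)
  String.mk (res.1 ++ List.replicate ((unit_width : Int) * (last_beat + 1 - res.2)).toNat '-')

-- ===== PRECONDITION & SPEC =====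
def Spec_notes_to_dulcimer_tab (notes : List (Int × String)) (last_beat : Int) (bar_lines : Option (List (Int × String))) (out : String) : Prop := out = notes_to_dulcimer_tab_alt notes last_beat bar_lines
instance (notes : List (Int × String)) (last_beat : Int) (bar_lines : Option (List (Int × String))) (out : String) : Decidable (Spec_notes_to_dulcimer_tab notes last_beat bar_lines out) := by unfold Spec_notes_to_dulcimer_tab; infer_instance

-- ===== CLAIM (what is proved, stated in full; the proofs are below) =====
def Claim_equal_notes_to_dulcimer_tab : Prop := ∀ (notes : List (Int × String)) (last_beat : Int) (bar_lines : Option (List (Int × String))), Dom_notes_to_dulcimer_tab notes last_beat bar_lines → Spec_notes_to_dulcimer_tab notes last_beat bar_lines (notes_to_dulcimer_tab notes last_beat bar_lines)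

-- ===== LEMMAS AND PROOFS =====

-- the per-beat cell A emits
def pvCell (nd bl : PySem.Dict Int String) (uw : Nat) (beat : Int) : List Char :=
  if nd.contains beat then
    let notev := nd.getD beat ""
    let fill := match dulcimerMap.get? notev with
      | some v => v
      | none => notev
    fill.toList ++ List.replicate (uw - fill.toList.length) '-'
  else if bl.contains beat then
    List.replicate uw '|'
  else
    List.replicate uw '-'

lemma pv_toNat_mul (a : Nat) (b : Int) : ((a : Int) * b).toNat = a * b.toNat := by
  rcases b with n | n
  · rw [Int.ofNat_eq_natCast, ← Int.natCast_mul, Int.toNat_natCast, Int.toNat_natCast]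
  · rw [Int.toNat_of_nonpos (mul_nonpos_of_nonneg_of_nonpos (Int.natCast_nonneg a) (by omega))]
    simp

lemma pv_flatten_dashes (uw : Nat) (l : List Int) :
    (l.map (fun _ => List.replicate uw '-')).flatten = List.replicate (uw * l.length) '-' := by
  induction l with
  | nil => simp
  | cons x xs ih =>
    simp only [List.map_cons, List.flatten_cons, ih, List.length_cons]
    rw [List.replicate_append_replicate]
    congr 1
    ring

lemma pv_dash_range (nd bl : PySem.Dict Int String) (uw : Nat) (lo hi : Int)
    (h : ∀ b, lo ≤ b → b < hi → ¬ (nd.contains b = true ∨ bl.contains b = true)) :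
    ((PySem.List.pyRange lo hi 1).map (pvCell nd bl uw)).flatten
      = List.replicate ((uw : Int) * (hi - lo)).toNat '-' := by
  have hmap : (PySem.List.pyRange lo hi 1).map (pvCell nd bl uw)
      = (PySem.List.pyRange lo hi 1).map (fun _ => List.replicate uw '-') := by
    apply List.map_congr_left
    intro b hb
    rcases PySem.List.mem_pyRange_one.mp hb with ⟨h1, h2⟩
    have := h b h1 h2
    simp only [pvCell]
    rw [if_neg (by tauto), if_neg (by tauto)]
  rw [hmap, pv_flatten_dashes, pv_toNat_mul, PySem.List.length_pyRange_one]

-- the cursor walk of B produces exactly A's per-beat rendering of [c, lb]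
lemma pv_walk (nd bl : PySem.Dict Int String) (uw : Nat) (lb : Int) :
    ∀ (es : List Int) (c : Int) (acc : List Char),
      es.Pairwise (· < ·) →
      (∀ e ∈ es, c ≤ e ∧ e ≤ lb) →
      (∀ b, c ≤ b → b ≤ lb → ((b ∈ es) ↔ (nd.contains b = true ∨ bl.contains b = true))) →
      (es.foldl (fun st pos =>
          let gap := List.replicate ((uw : Int) * (pos - st.2)).toNat '-'
          let cellc : List Char :=
            if nd.contains pos then
              let notev := nd.getD pos ""
              let fill := (dulcimerMap.get? notev).getD notev
              fill.toList ++ List.replicate (uw - fill.toList.length) '-'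
            else
              List.replicate uw '|'
          (st.1 ++ gap ++ cellc, pos + 1)) (acc, c)).1
        ++ List.replicate ((uw : Int) * (lb + 1 -
            (es.foldl (fun st pos =>
              let gap := List.replicate ((uw : Int) * (pos - st.2)).toNat '-'
              let cellc : List Char :=
                if nd.contains pos then
                  let notev := nd.getD pos ""
                  let fill := (dulcimerMap.get? notev).getD notev
                  fill.toList ++ List.replicate (uw - fill.toList.length) '-'
                else
                  List.replicate uw '|'
              (st.1 ++ gap ++ cellc, pos + 1)) (acc, c)).2)).toNat '-'
      = acc ++ ((PySem.List.pyRange c (lb + 1) 1).map (pvCell nd bl uw)).flatten := by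
  intro es
  induction es with
  | nil =>
    intro c acc _ _ hiff
    simp only [List.foldl_nil]
    rw [pv_dash_range nd bl uw c (lb + 1)]
    intro b h1 h2 hcon
    exact absurd ((hiff b h1 (by omega)).mpr hcon) (List.not_mem_nil)
  | cons e es ih =>
    intro c acc hpw hbnd hiff
    have hce : c ≤ e := (hbnd e (by simp)).1
    have helb : e ≤ lb := (hbnd e (by simp)).2
    have hev : nd.contains e = true ∨ bl.contains e = true :=
      (hiff e hce helb).mp (by simp)
    simp only [List.foldl_cons]
    rw [ih (e + 1) _ hpw.of_cons
      (fun e' he' => ⟨by have := (List.pairwise_cons.mp hpw).1 e' he'; omega, (hbnd e' (by simp [he'])).2⟩)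
      (fun b h1 h2 => by
        rw [← hiff b (by omega) h2]
        constructor
        · intro hb; simp [hb]
        · intro hb; rcases List.mem_cons.mp hb with h | h
          · omega
          · exact h)]
    rw [PySem.List.pyRange_one_append c e (lb + 1) hce (by omega),
        PySem.List.pyRange_one_cons (show e < lb + 1 by omega)]
    rw [List.map_append, List.flatten_append, List.map_cons, List.flatten_cons,
        pv_dash_range nd bl uw c e (fun b h1 h2 hcon => by
          have hb := (hiff b h1 (by omega)).mpr hcon
          rcases List.mem_cons.mp hb with h | h
          · omega
          · have := (List.pairwise_cons.mp hpw).1 b h; omega)]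
    have hcell : pvCell nd bl uw e =
        (if nd.contains e then
          let notev := nd.getD e ""
          let fill := (dulcimerMap.get? notev).getD notev
          fill.toList ++ List.replicate (uw - fill.toList.length) '-'
        else
          List.replicate uw '|') := by
      simp only [pvCell]
      by_cases h1 : nd.contains e = true
      · simp only [h1, if_true]
        cases dulcimerMap.get? (nd.getD e "") <;> rfl
      · have h2 : bl.contains e = true := by tauto
        simp [h1, h2]
    rw [hcell]
    simp [List.append_assoc]

lemma pv_uwA : dulcimerMap.keys.foldl (fun w note =>
    if (dulcimerMap.getD note "").toList.length > w then (dulcimerMap.getD note "").toList.length else w) 0 = 10 := by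
  decide

lemma pv_uwB : PySem.List.maxD (dulcimerMap.values.map (fun v => v.toList.length)) (fun x => x) 0 = 10 := by
  decide

-- A's loop body appends a per-beat cell
lemma pv_A_flat (nd bl : PySem.Dict Int String) (uw : Nat) (lb : Int) :
    (PySem.List.pyRange 0 (lb + 1) 1).foldl (fun acc beat =>
      if nd.contains beat then
        let notev := nd.getD beat ""
        let fill := match dulcimerMap.get? notev with
          | some v => v
          | none => notev
        acc ++ (fill.toList ++ List.replicate (uw - fill.toList.length) '-')
      else if bl.contains beat then
        acc ++ List.replicate uw '|'
      else
        acc ++ List.replicate uw '-') []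
    = ((PySem.List.pyRange 0 (lb + 1) 1).map (pvCell nd bl uw)).flatten := by
  have hbody : (fun (acc : List Char) (beat : Int) =>
      if nd.contains beat then
        let notev := nd.getD beat ""
        let fill := match dulcimerMap.get? notev with
          | some v => v
          | none => notev
        acc ++ (fill.toList ++ List.replicate (uw - fill.toList.length) '-')
      else if bl.contains beat then
        acc ++ List.replicate uw '|'
      else
        acc ++ List.replicate uw '-')
      = fun acc beat => acc ++ pvCell nd bl uw beat := by
    funext acc beat
    simp only [pvCell]
    split_ifs <;> rfl
  rw [hbody, PySem.List.foldl_append_eq_flatMap, List.flatMap_def, List.nil_append]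

-- the properties of B's sorted event list
lemma pv_events (nd bl : PySem.Dict Int String) (lb : Int) :
    (PySem.List.sorted (((PySem.Set.ofList nd.keys).union bl.keys).filter
        (fun k => decide (0 ≤ k) && decide (k ≤ lb))) (fun x => x) false).Pairwise (· < ·) ∧
    (∀ e ∈ PySem.List.sorted (((PySem.Set.ofList nd.keys).union bl.keys).filter
        (fun k => decide (0 ≤ k) && decide (k ≤ lb))) (fun x => x) false, (0 : Int) ≤ e ∧ e ≤ lb) ∧
    (∀ b : Int, 0 ≤ b → b ≤ lb →
      ((b ∈ PySem.List.sorted (((PySem.Set.ofList nd.keys).union bl.keys).filter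
          (fun k => decide (0 ≤ k) && decide (k ≤ lb))) (fun x => x) false)
        ↔ (nd.contains b = true ∨ bl.contains b = true))) := by
  have hmemf : ∀ b : Int, b ∈ ((PySem.Set.ofList nd.keys).union bl.keys).filter
      (fun k => decide (0 ≤ k) && decide (k ≤ lb)) ↔
      ((b ∈ nd.keys ∨ b ∈ bl.keys) ∧ 0 ≤ b ∧ b ≤ lb) := by
    intro b
    rw [List.mem_filter, PySem.Set.mem_union, PySem.Set.mem_ofList]
    simp
  have hnd : (((PySem.Set.ofList nd.keys).union bl.keys).filter
      (fun k => decide (0 ≤ k) && decide (k ≤ lb))).Nodup :=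
    (PySem.Set.nodup_union _ _ (PySem.Set.nodup_ofList _)).filter _
  have hmems : ∀ b : Int, b ∈ PySem.List.sorted (((PySem.Set.ofList nd.keys).union bl.keys).filter
      (fun k => decide (0 ≤ k) && decide (k ≤ lb))) (fun x => x) false ↔
      ((b ∈ nd.keys ∨ b ∈ bl.keys) ∧ 0 ≤ b ∧ b ≤ lb) := by
    intro b
    rw [PySem.List.mem_sorted]
    exact hmemf b
  refine ⟨?_, ?_, ?_⟩
  · have hle := PySem.List.sorted_pairwise (((PySem.Set.ofList nd.keys).union bl.keys).filter
      (fun k => decide (0 ≤ k) && decide (k ≤ lb))) (fun x => x)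
    have hnds : (PySem.List.sorted (((PySem.Set.ofList nd.keys).union bl.keys).filter
        (fun k => decide (0 ≤ k) && decide (k ≤ lb))) (fun x => x) false).Nodup :=
      (PySem.List.sorted_perm _ _ _).nodup_iff.mpr hnd
    exact (hle.and hnds).imp (fun h => lt_of_le_of_ne h.1 h.2)
  · intro e he
    exact ((hmems e).mp he).2
  · intro b h1 h2
    rw [hmems b]
    rw [PySem.Dict.contains_iff_mem_keys, PySem.Dict.contains_iff_mem_keys]
    tauto

-- ===== VERDICT (by name: the statement is the Claim_ definition above) =====
theorem notes_to_dulcimer_tab_spec : Claim_equal_notes_to_dulcimer_tab := by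
  intro notes last_beat bar_lines _
  unfold Spec_notes_to_dulcimer_tab notes_to_dulcimer_tab notes_to_dulcimer_tab_alt
  simp only [pv_uwA, pv_uwB]
  rw [pv_A_flat]
  obtain ⟨hpw, hbnd, hiff⟩ := pv_events (PySem.Dict.ofList notes)
    (PySem.Dict.ofList (bar_lines.getD [])) last_beat
  have hw := pv_walk (PySem.Dict.ofList notes) (PySem.Dict.ofList (bar_lines.getD [])) 10 last_beat
    _ 0 [] hpw hbnd hiff
  rw [List.nil_append] at hw
  rw [← hw]
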